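-- pv_equiv track=rewrite | github.com/alliedmodders/ambuild | ambuild2/make_parser.py | LineHasContinuation
-- ===== SOURCE A (Python) =====
-- def LineHasContinuation(line):
--     num_escapes = 0
--
--     pos = len(line) - 1
--     while pos >= 0:
--         if line[pos] != '\\':
--             break
--         num_escapes += 1
--         pos -= 1
--
--     return num_escapes % 2 == 1
-- ===== SOURCE B (Python) =====
-- def LineHasContinuation(line):
--     # Forward scan with an "escaped" flag: a backslash escapes the next char
--     # unless it is itself escaped; at end of line the flag says whether the
--     # final newline would be escaped, i.e. the line continues.
--     escaped = False
--     for ch in line: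
--         escaped = ch == '\\' and not escaped
--     return escaped
-- ===== Notes on version B (the rewrite author's own statement) =====
-- stated objective: alternative
-- what changed: Replaces the backwards trailing-backslash count and parity test with a forward single-pass escape automaton: a boolean escaped-flag updated at every character, whose final value is the answer; no counting, no modulo, no reverse scan.
import Mathlib
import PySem

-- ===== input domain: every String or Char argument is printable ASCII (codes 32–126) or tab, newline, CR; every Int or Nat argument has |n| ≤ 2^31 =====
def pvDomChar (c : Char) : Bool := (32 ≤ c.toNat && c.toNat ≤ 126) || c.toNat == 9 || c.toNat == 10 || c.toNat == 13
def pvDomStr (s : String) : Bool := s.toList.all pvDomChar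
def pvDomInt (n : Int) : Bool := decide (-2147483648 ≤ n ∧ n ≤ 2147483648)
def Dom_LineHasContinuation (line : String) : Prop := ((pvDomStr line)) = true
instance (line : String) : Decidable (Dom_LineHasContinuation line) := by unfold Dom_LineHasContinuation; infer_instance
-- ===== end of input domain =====

-- B replaces A's backward trailing-backslash count + parity test with a forward
-- single-pass escape automaton (a toggled Bool flag); objective: alternative.

-- ===== PORT A =====
-- the while loop: walk from the last index backwards, counting '\' until a
-- non-'\' (break) or pos < 0; transliterated as structural recursion over the
-- reversed character list (same visiting order, same count)
def pvCountEscA : List Char → Nat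
  | [] => 0
  | c :: rest => if c ≠ '\\' then 0 else pvCountEscA rest + 1

def LineHasContinuation (line : String) : Bool :=
  pvCountEscA line.toList.reverse % 2 == 1

-- ===== PORT B =====
-- the for loop over the characters, updating the escaped flag, as a foldl
def LineHasContinuation_alt (line : String) : Bool :=
  line.toList.foldl (fun escaped ch => ch == '\\' && !escaped) false

-- ===== PRECONDITION & SPEC =====
def Spec_LineHasContinuation (line : String) (out : Bool) : Prop := out = LineHasContinuation_alt line
instance (line : String) (out : Bool) : Decidable (Spec_LineHasContinuation line out) := by unfold Spec_LineHasContinuation; infer_instance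

-- ===== CLAIM (what is proved, stated in full; the proofs are below) =====
def Claim_equal_LineHasContinuation : Prop := ∀ (line : String), Dom_LineHasContinuation line → Spec_LineHasContinuation line (LineHasContinuation line)

-- ===== LEMMAS AND PROOFS =====

-- ===== VERDICT (by name: the statement is the Claim_ definition above) =====
-- the flag after scanning l forwards equals the parity of l's trailing '\'-run
theorem pvFold_eq (l : List Char) :
    l.foldl (fun escaped ch => ch == '\\' && !escaped) false
      = (pvCountEscA l.reverse % 2 == 1) := by
  induction l using List.reverseRecOn with
  | nil => simp [pvCountEscA]
  | append_singleton l c ih =>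
    rw [List.foldl_append, List.foldl_cons, List.foldl_nil, ih]
    by_cases h : c = '\\'
    · subst h
      simp only [List.reverse_append, List.reverse_singleton, List.singleton_append,
        pvCountEscA, ne_eq, not_true_eq_false, if_false, beq_self_eq_true, Bool.true_and]
      rcases Nat.mod_two_eq_zero_or_one (pvCountEscA l.reverse) with h2 | h2 <;>
        simp [Nat.add_mod, h2]
    · simp [pvCountEscA, h]

-- ===== VERDICT (by name: the statement is the Claim_ definition above) =====
theorem LineHasContinuation_spec : Claim_equal_LineHasContinuation := by
  intro line _
  unfold Spec_LineHasContinuation LineHasContinuation LineHasContinuation_alt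
  rw [pvFold_eq]
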